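-- pv_equiv track=rewrite | github.com/NumSlower/May | words.py | is_english_like
-- ===== SOURCE A (Python) =====
-- import string
--
-- MAX_WORD_LENGTH = 15
--
-- MIN_WORD_LENGTH = 2
--
-- VOWELS = set("aeiou")
--
-- CONSONANTS = set(string.ascii_lowercase) - VOWELS
--
-- def is_english_like(word):
--     length = len(word)
--     if length < MIN_WORD_LENGTH or length > MAX_WORD_LENGTH:
--         return False
--     has_vowel = any(char in VOWELS for char in word)
--     if not has_vowel:
--         return False
--     consonant_run = 0
--     for char in word:
--         if char in CONSONANTS:
--             consonant_run += 1
--             if consonant_run > 4: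
--                 return False
--         else:
--             consonant_run = 0
--     return True
-- ===== SOURCE B (Python) =====
-- import string
--
-- MAX_WORD_LENGTH = 15
-- MIN_WORD_LENGTH = 2
-- VOWELS = set("aeiou")
-- CONSONANTS = set(string.ascii_lowercase) - VOWELS
--
--
-- def is_english_like(word):
--     if not (MIN_WORD_LENGTH <= len(word) <= MAX_WORD_LENGTH):
--         return False
--     if VOWELS.isdisjoint(word):
--         return False
--     masked = "".join(c if c in CONSONANTS else " " for c in word)
--     return all(len(run) <= 4 for run in masked.split())
-- ===== Notes on version B (the rewrite author's own statement) =====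
-- stated objective: alternative
-- what changed: A's resettable consonant-run counter with an early return is replaced by masking every non-consonant to a space, splitting on whitespace, and checking that every resulting consonant run has length <= 4; the vowel test becomes a set-disjointness test.
import Mathlib
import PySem

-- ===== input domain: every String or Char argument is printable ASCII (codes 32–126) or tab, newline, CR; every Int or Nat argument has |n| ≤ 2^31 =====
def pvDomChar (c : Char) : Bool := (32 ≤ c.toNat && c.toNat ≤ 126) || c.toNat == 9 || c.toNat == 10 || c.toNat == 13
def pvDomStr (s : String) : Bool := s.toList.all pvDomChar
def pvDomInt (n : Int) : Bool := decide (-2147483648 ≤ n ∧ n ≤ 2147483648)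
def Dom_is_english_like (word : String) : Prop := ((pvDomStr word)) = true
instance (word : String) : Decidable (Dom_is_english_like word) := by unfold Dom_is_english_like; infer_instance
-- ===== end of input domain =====

-- B replaces A's resettable consonant-run counter (with early return) by a mask-to-spaces +
-- whitespace-split decomposition checking every consonant run's length; objective: alternative.


-- module constants (shared by A and B, as in the Python module)
def pvVOWELS : List Char := PySem.Set.ofList "aeiou".toList
-- set(string.ascii_lowercase) - VOWELS, as a set difference
def pvCONSONANTS : List Char :=
  (PySem.Set.ofList "abcdefghijklmnopqrstuvwxyz".toList).filter (fun c => !(pvVOWELS.contains c))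

-- 'char in VOWELS' / 'char in CONSONANTS'
def pvIsVowel (c : Char) : Bool := pvVOWELS.contains c
def pvIsCons (c : Char) : Bool := pvCONSONANTS.contains c

-- ===== PORT A =====
-- the for-loop over word with consonant_run and its early 'return False'
def pvALoop : List Char → Int → Bool
  | [], _ => true
  | c :: rest, run =>
    if pvIsCons c then
      if run + 1 > 4 then false else pvALoop rest (run + 1)
    else pvALoop rest 0

def is_english_like (word : String) : Bool :=
  let length : Int := PySem.Str.len word
  if length < 2 || length > 15 then false
  else
    let has_vowel := word.toList.any (fun c => pvIsVowel c)
    if !has_vowel then false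
    else pvALoop word.toList 0

-- ===== PORT B =====
def is_english_like_alt (word : String) : Bool :=
  let n : Int := PySem.Str.len word
  if !(2 ≤ n && n ≤ 15) then false
  else if word.toList.all (fun c => !(pvIsVowel c)) then false
  else
    let masked := word.toList.map (fun c => if pvIsCons c then c else ' ')
    (PySem.Chars.split₀ masked).all (fun run => run.length ≤ 4)

-- ===== PRECONDITION & SPEC =====
def Spec_is_english_like (word : String) (out : Bool) : Prop := out = is_english_like_alt word
instance (word : String) (out : Bool) : Decidable (Spec_is_english_like word out) := by unfold Spec_is_english_like; infer_instance

-- ===== CLAIM (what is proved, stated in full; the proofs are below) =====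
def Claim_equal_is_english_like : Prop := ∀ (word : String), Dom_is_english_like word → Spec_is_english_like word (is_english_like word)

-- ===== LEMMAS AND PROOFS =====

-- run-length checker over the masked characters (spaces separate runs)
def pvAux : List Char → Nat → Bool
  | [], n => n ≤ 4
  | c :: rest, n =>
    if PySem.Chars.isspace c then decide (n ≤ 4) && pvAux rest 0 else pvAux rest (n + 1)

-- the same checker phrased over the original characters (consonant test instead of space test)
def pvAux2 : List Char → Nat → Bool
  | [], n => n ≤ 4
  | c :: rest, n =>
    if pvIsCons c then pvAux2 rest (n + 1) else decide (n ≤ 4) && pvAux2 rest 0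

lemma pv_go_all (s : List Char) : ∀ (cur : List Char) (acc : List (List Char)),
    (PySem.Chars.split₀.go s cur acc).all (fun run => run.length ≤ 4)
      = (acc.all (fun run => run.length ≤ 4) && pvAux s cur.length) := by
  induction s with
  | nil =>
    intro cur acc
    simp only [PySem.Chars.split₀.go, pvAux]
    by_cases h : cur.isEmpty
    · simp [List.isEmpty_iff.mp h]
    · simp only [h, if_neg, Bool.false_eq_true, not_false_iff, List.all_cons, List.all_reverse,
        List.length_reverse]
      simp [Bool.and_comm]
  | cons c rest ih =>
    intro cur acc
    simp only [PySem.Chars.split₀.go]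
    by_cases hs : PySem.Chars.isspace c
    · by_cases he : cur.isEmpty
      · simp [hs, ih, pvAux, List.isEmpty_iff.mp he]
      · simp only [hs, he, if_pos, if_neg, ih, pvAux, List.all_cons, Bool.false_eq_true,
          not_false_iff, List.length_reverse]
        by_cases h4 : cur.length ≤ 4 <;> simp [h4, Bool.and_comm]
    · simp [hs, ih, pvAux]

lemma pv_cons_eq : pvCONSONANTS
    = ['b','c','d','f','g','h','j','k','l','m','n','p','q','r','s','t','v','w','x','y','z'] := by rfl

lemma pv_cons_not_space (c : Char) (hc : pvIsCons c = true) : PySem.Chars.isspace c = false := by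
  have h : pvCONSONANTS.all (fun c => !PySem.Chars.isspace c) = true := by rw [pv_cons_eq]; decide
  have hm : c ∈ pvCONSONANTS := by
    simpa [pvIsCons] using hc
  simpa using List.all_eq_true.mp h c hm

lemma pv_mask (l : List Char) : ∀ n,
    pvAux (l.map (fun c => if pvIsCons c then c else ' ')) n = pvAux2 l n := by
  induction l with
  | nil => intro n; rfl
  | cons c rest ih =>
    intro n
    simp only [List.map_cons, pvAux, pvAux2]
    by_cases hc : pvIsCons c
    · have hns := pv_cons_not_space c hc
      simp [hc, hns, ih]
    · have hsp : PySem.Chars.isspace ' ' = true := by decide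
      simp [hc, hsp, ih]

lemma pv_aux2_dead (l : List Char) : ∀ n, 4 < n → pvAux2 l n = false := by
  induction l with
  | nil => intro n hn; simp [pvAux2]; omega
  | cons c rest ih =>
    intro n hn
    simp only [pvAux2]
    by_cases hc : pvIsCons c
    · simp [hc, ih (n + 1) (by omega)]
    · simp [hc]; omega

lemma pv_loop_eq (l : List Char) : ∀ n : Nat, n ≤ 4 → pvALoop l (n : Int) = pvAux2 l n := by
  induction l with
  | nil => intro n hn; simp [pvALoop, pvAux2, hn]
  | cons c rest ih =>
    intro n hn
    simp only [pvALoop, pvAux2]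
    by_cases hc : pvIsCons c
    · by_cases h4 : n = 4
      · subst h4
        simp [hc, pv_aux2_dead rest 5 (by omega)]
      · have h5 : ¬ ((n : Int) + 1 > 4) := by omega
        have hcast : (n : Int) + 1 = ((n + 1 : Nat) : Int) := by push_cast; ring
        rw [if_pos hc, if_neg h5, hcast, if_pos hc]
        exact ih (n + 1) (by omega)
    · have h0 : pvALoop rest ((0 : Nat) : Int) = pvAux2 rest 0 := ih 0 (by omega)
      simp only [Nat.cast_zero] at h0
      simp [hc, h0, hn]

-- ===== VERDICT (by name: the statement is the Claim_ definition above) =====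
theorem is_english_like_spec : Claim_equal_is_english_like := by
  intro word _
  unfold Spec_is_english_like is_english_like is_english_like_alt
  simp only [PySem.Str.len_eq, String.length_toList]
  by_cases hA : (((word.length : Int) < 2 || (word.length : Int) > 15) = true)
  · have hB : (!(2 ≤ (word.length : Int) && (word.length : Int) ≤ 15)) = true := by
      simp only [Bool.or_eq_true, decide_eq_true_eq] at hA
      simp only [Bool.not_eq_true', Bool.and_eq_false_iff, decide_eq_false_iff_not]
      omega
    rw [if_pos hA, if_pos hB]
  · have hB : ¬ ((!(2 ≤ (word.length : Int) && (word.length : Int) ≤ 15)) = true) := by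
      simp only [Bool.or_eq_true, decide_eq_true_eq, not_or] at hA
      simp only [Bool.not_eq_true', Bool.and_eq_true, decide_eq_true_eq, Bool.not_eq_false]
      omega
    rw [if_neg hA, if_neg hB]
    by_cases hv : (word.toList.any (fun c => pvIsVowel c)) = true
    · have hv2 : (word.toList.all (fun c => !(pvIsVowel c))) = true → False := by
        intro h
        simp only [List.any_eq_true] at hv
        obtain ⟨c, hc, hcv⟩ := hv
        have := List.all_eq_true.mp h c hc
        simp [hcv] at this
      rw [if_neg (by simpa using hv), if_neg (by exact fun h => hv2 h)]
      have hgo := pv_go_all (word.toList.map (fun c => if pvIsCons c then c else ' ')) [] []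
      simp only [List.all_nil, Bool.true_and, List.length_nil] at hgo
      rw [PySem.Chars.split₀, hgo, pv_mask]
      have h0 := pv_loop_eq word.toList 0 (by omega)
      simpa using h0
    · have hv2 : (word.toList.all (fun c => !(pvIsVowel c))) = true := by
        simp only [List.all_eq_true]
        intro c hc
        by_contra h
        apply hv
        simp only [List.any_eq_true]
        exact ⟨c, hc, by simpa using h⟩
      rw [if_pos (by simpa using hv), if_pos hv2]
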